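-- pv_equiv track=rewrite | github.com/mjendrusch/novobench | novobench/uncrop.py | chain_sequence
-- ===== SOURCE A (Python) =====
-- def chain_sequence(sequence, chain_index):
--     result = []
--     current_idx = chain_index[0]
--     for aa, idx in zip(sequence, chain_index):
--         if idx != current_idx:
--             current_idx = idx
--             result.append(":")
--         result.append(aa)
--     return "".join(result)
-- ===== SOURCE B (Python) =====
-- def chain_sequence(sequence, chain_index):
--     segments = []
--     for aa, idx in zip(sequence, chain_index):
--         if segments and segments[-1][0] == idx:
--             segments[-1][1].append(aa)
--         else:
--             segments.append((idx, [aa]))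
--     return ":".join("".join(chars) for _, chars in segments)
-- ===== Notes on version B (the rewrite author's own statement) =====
-- stated objective: idiomatic
-- what changed: B groups the zipped (residue, index) pairs into per-chain segments in one pass and joins the segments with ':', instead of threading a current-index state and interleaving ':' sentinels into one flat result list.
-- crash fix: A raises IndexError on an empty chain_index (it reads chain_index[0]); B naturally returns '' there. — e.g. on chain_sequence(["A"], []): A raises IndexError, B returns ""
import Mathlib
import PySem

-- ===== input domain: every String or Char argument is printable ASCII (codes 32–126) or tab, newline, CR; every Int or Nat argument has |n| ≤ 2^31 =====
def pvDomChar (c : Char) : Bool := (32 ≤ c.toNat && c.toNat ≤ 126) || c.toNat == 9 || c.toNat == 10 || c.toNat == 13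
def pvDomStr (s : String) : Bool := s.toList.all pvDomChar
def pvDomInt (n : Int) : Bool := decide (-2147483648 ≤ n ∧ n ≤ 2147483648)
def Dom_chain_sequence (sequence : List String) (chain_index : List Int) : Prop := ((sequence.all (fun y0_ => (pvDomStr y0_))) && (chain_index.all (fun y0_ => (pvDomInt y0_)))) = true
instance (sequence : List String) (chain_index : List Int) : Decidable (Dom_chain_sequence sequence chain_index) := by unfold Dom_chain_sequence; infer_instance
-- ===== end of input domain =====

-- B groups the zipped (residue, index) pairs into per-chain segments and joins them with ':' (idiomatic decomposition); A threads a current-index state and interleaves ':' sentinels into one flat list.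


-- ===== PORT A =====
def pvStepA (st : Int × List String) (p : String × Int) : Int × List String :=
  if p.2 ≠ st.1 then (p.2, st.2 ++ [":", p.1]) else (st.1, st.2 ++ [p.1])

def chain_sequence (sequence : List String) (chain_index : List Int) : String :=
  match PySem.List.pyGet? chain_index 0 with
  | none => ""  -- IndexError on empty chain_index; excluded by Pre_
  | some c0 =>
      PySem.Str.join "" ((List.zip sequence chain_index).foldl pvStepA (c0, [])).2

-- ===== PORT B =====
def pvStepB (segs : List (Int × List String)) (p : String × Int) : List (Int × List String) :=
  match segs.getLast? with
  | some g => if g.1 = p.2 then segs.dropLast ++ [(g.1, g.2 ++ [p.1])] else segs ++ [(p.2, [p.1])]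
  | none => [(p.2, [p.1])]

def chain_sequence_alt (sequence : List String) (chain_index : List Int) : String :=
  PySem.Str.join ":"
    (((List.zip sequence chain_index).foldl pvStepB []).map (fun g => PySem.Str.join "" g.2))

-- ===== PRECONDITION & SPEC =====
-- Pre_ excludes only chain_index = [], on which A raises IndexError (chain_index[0]).
def Pre_chain_sequence (sequence : List String) (chain_index : List Int) : Prop := chain_index ≠ []
instance (sequence : List String) (chain_index : List Int) : Decidable (Pre_chain_sequence sequence chain_index) := by unfold Pre_chain_sequence; infer_instance
def pvWitness_chain_sequence : List String × List Int := (["M", "K", "L"], [0, 0, 1])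

-- A raises IndexError on an empty chain_index (it reads chain_index[0]); B naturally returns "" there.
def Raises_chain_sequence (sequence : List String) (chain_index : List Int) : Prop := chain_index = []
instance (sequence : List String) (chain_index : List Int) : Decidable (Raises_chain_sequence sequence chain_index) := by unfold Raises_chain_sequence; infer_instance
def pvRaiseWitness_chain_sequence : List String × List Int := (["A"], [])
def pvRaiseWitnessOut_chain_sequence : String := ""

def Spec_chain_sequence (sequence : List String) (chain_index : List Int) (out : String) : Prop := out = chain_sequence_alt sequence chain_index
instance (sequence : List String) (chain_index : List Int) (out : String) : Decidable (Spec_chain_sequence sequence chain_index out) := by unfold Spec_chain_sequence; infer_instance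

-- ===== CLAIM (what is proved, stated in full; the proofs are below) =====
def Claim_equal_chain_sequence : Prop := ∀ (sequence : List String) (chain_index : List Int), Dom_chain_sequence sequence chain_index → Pre_chain_sequence sequence chain_index → Spec_chain_sequence sequence chain_index (chain_sequence sequence chain_index)
def Claim_raises_chain_sequence : Prop := (∀ (sequence : List String) (chain_index : List Int), Dom_chain_sequence sequence chain_index → Raises_chain_sequence sequence chain_index → ¬ Pre_chain_sequence sequence chain_index) ∧ (Dom_chain_sequence (pvRaiseWitness_chain_sequence.1) (pvRaiseWitness_chain_sequence.2) ∧ Raises_chain_sequence (pvRaiseWitness_chain_sequence.1) (pvRaiseWitness_chain_sequence.2) ∧ chain_sequence_alt (pvRaiseWitness_chain_sequence.1) (pvRaiseWitness_chain_sequence.2) = pvRaiseWitnessOut_chain_sequence)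

-- ===== LEMMAS AND PROOFS =====

-- Segment rendering at the List Char level.
def pvSeg (g : Int × List String) : List Char :=
  PySem.Chars.join [] (g.2.map String.toList)

lemma pv_join_nil' (ls : List (List Char)) :
    PySem.Chars.join [] ls = ls.flatten := by
  induction ls with
  | nil => rfl
  | cons a l ih =>
      cases l with
      | nil => simp [PySem.Chars.join, List.intercalate]
      | cons b t =>
          simp only [PySem.Chars.join, List.intercalate, List.intersperse] at *
          simp_all [List.flatten]

lemma pv_join_nil (res : List String) :
    PySem.Chars.join [] (res.map String.toList) = (res.map String.toList).flatten :=
  pv_join_nil' _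

lemma pv_interc_cons₂ (sep a b : List Char) (l : List (List Char)) :
    sep.intercalate (a :: b :: l) = a ++ sep ++ sep.intercalate (b :: l) := by
  simp [List.intercalate, List.intersperse]

lemma pv_interc_append_singleton (sep : List Char) (xs : List (List Char)) (y : List Char)
    (h : xs ≠ []) :
    sep.intercalate (xs ++ [y]) = sep.intercalate xs ++ sep ++ y := by
  induction xs with
  | nil => cases h rfl
  | cons a l ih =>
      cases l with
      | nil => simp [List.intercalate]
      | cons b t =>
          have := ih (by simp)
          simp only [List.cons_append, pv_interc_cons₂] at *
          simp [this]

lemma pv_interc_last_extend (sep : List Char) (xs : List (List Char)) (y z : List Char) :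
    sep.intercalate (xs ++ [y ++ z]) = sep.intercalate (xs ++ [y]) ++ z := by
  induction xs with
  | nil => simp [List.intercalate]
  | cons a l ih =>
      cases l with
      | nil => simp [List.intercalate]
      | cons b t =>
          simp only [List.cons_append, pv_interc_cons₂] at *
          simp [ih]

-- Rendering B's segment list with ':' separators.
def pvRenderB (segs : List (Int × List String)) : List Char :=
  PySem.Chars.join [':'] (segs.map pvSeg)

lemma pv_main (pairs : List (String × Int)) :
    ∀ (cur : Int) (res : List String) (segs : List (Int × List String)) (g : Int × List String),
    g.1 = cur →
    (res.map String.toList).flatten = pvRenderB (segs ++ [g]) →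
    (((pairs.foldl pvStepA (cur, res)).2.map String.toList).flatten
      = pvRenderB (pairs.foldl pvStepB (segs ++ [g]))) := by
  induction pairs with
  | nil => intro cur res segs g hg h; simpa using h
  | cons p rest ih =>
      intro cur res segs g hg h
      obtain ⟨aa, idx⟩ := p
      by_cases hidx : idx = cur
      · -- same chain: A appends aa; B extends the last segment
        have hA : pvStepA (cur, res) (aa, idx) = (cur, res ++ [aa]) := by
          simp [pvStepA, hidx]
        have hB : pvStepB (segs ++ [g]) (aa, idx) = segs ++ [(g.1, g.2 ++ [aa])] := by
          simp [pvStepB, hg, hidx]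
        simp only [List.foldl_cons]
        rw [hA, hB]
        refine ih cur (res ++ [aa]) segs (g.1, g.2 ++ [aa]) hg ?_
        have hr : pvSeg (g.1, g.2 ++ [aa]) = pvSeg g ++ aa.toList := by
          simp [pvSeg, pv_join_nil']
        simp only [pvRenderB, List.map_append, List.map_cons, List.map_nil, hr]
        rw [PySem.Chars.join, pv_interc_last_extend]
        simp only [pvRenderB, List.map_append, List.map_cons, List.map_nil, PySem.Chars.join] at h
        simp [h]
      · -- new chain: A appends ":" then aa; B starts a new segment
        have hA : pvStepA (cur, res) (aa, idx) = (idx, res ++ [":", aa]) := by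
          simp [pvStepA, hidx]
        have hne : ¬ g.1 = idx := by rw [hg]; exact fun e => hidx e.symm
        have hB : pvStepB (segs ++ [g]) (aa, idx) = (segs ++ [g]) ++ [(idx, [aa])] := by
          simp [pvStepB, hne]
        simp only [List.foldl_cons]
        rw [hA, hB]
        refine ih idx (res ++ [":", aa]) (segs ++ [g]) (idx, [aa]) rfl ?_
        have hr : pvSeg (idx, [aa]) = aa.toList := by
          simp [pvSeg]
        simp only [pvRenderB, PySem.Chars.join]
        rw [List.map_append (l₁ := segs ++ [g]) (l₂ := [(idx, [aa])])]
        simp only [List.map_cons, List.map_nil, hr]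
        rw [pv_interc_append_singleton [':'] (List.map pvSeg (segs ++ [g])) aa.toList (by simp)]
        simp only [pvRenderB, PySem.Chars.join] at h
        simp [List.map_append, List.flatten_append, h]

-- ===== VERDICT (by name: the statement is the Claim_ definition above) =====
theorem chain_sequence_spec : Claim_equal_chain_sequence := by
  intro sequence chain_index _ hpre
  unfold Spec_chain_sequence
  obtain ⟨c0, rest, rfl⟩ : ∃ c0 rest, chain_index = c0 :: rest := by
    cases chain_index with
    | nil => cases hpre rfl
    | cons a l => exact ⟨a, l, rfl⟩
  cases sequence with
  | nil =>
      have halt : chain_sequence_alt [] (c0 :: rest) = "" := rfl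
      rw [halt]
      unfold chain_sequence
      split <;> rfl
  | cons aa seqrest =>
      have h0 : PySem.List.pyGet? (c0 :: rest) 0 = some c0 := by
        simp [PySem.List.pyGet?, PySem.List.pyIdx?]
      have key := pv_main (List.zip seqrest rest) c0 [aa] [] (c0, [aa]) rfl
        (by simp [pvRenderB, pvSeg, PySem.Chars.join, List.intercalate])
      have hA1 : pvStepA (c0, []) (aa, c0) = (c0, [aa]) := by simp [pvStepA]
      have hB1 : pvStepB [] (aa, c0) = [(c0, [aa])] := by simp [pvStepB]
      unfold chain_sequence chain_sequence_alt
      rw [h0]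
      simp only [List.zip_cons_cons, List.foldl_cons, hA1, hB1]
      have : ([] : List (Int × List String)) ++ [(c0, [aa])] = [(c0, [aa])] := rfl
      rw [this] at key
      -- turn the Str.join equality goal into the Chars-level equality `key`
      unfold PySem.Str.join
      apply congrArg
      have hmap : ∀ (B : List (Int × List String)),
          List.map String.toList
            (List.map (fun g => String.ofList (PySem.Chars.join ("" : String).toList (List.map String.toList g.2))) B)
          = List.map pvSeg B := by
        intro B
        simp [List.map_map, pvSeg, Function.comp, String.toList_ofList]
      rw [show ("" : String).toList = [] from rfl, show (":" : String).toList = [':'] from rfl] at *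
      rw [pv_join_nil, hmap]
      simpa [pvRenderB] using key

@[simp] theorem chain_sequence_raises : Claim_raises_chain_sequence := by
  unfold Claim_raises_chain_sequence
  constructor
  · intro sequence chain_index _ hr hpre; exact hpre hr
  · exact ⟨by decide, rfl, by decide⟩
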